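-- pv_equiv track=rewrite | github.com/gangadhar-kadam/sapphire_app | stock/report/warehouse_wise_stock_details/warehouse_wise_stock_details.py | fmt_data
-- ===== SOURCE A (Python) =====
-- def fmt_data(data):
--         l4 = []
--         prev = -2
--         for d in data:
--                 l2 = ['' for q in range(len(data[0]))]
--                 l3 = ['' for q in range(len(data[0]))]
--                 if len(l4) != 0:
--                         if l4[prev][0] != d[0]:
--                                 l2[0] = d[0]
--                                 l4.append(l2)
--                                 prev = -2
--                         else:
--                                 prev = prev-1
--                 else:
--                         l2[0] = d[0]
--                         l4.append(l2)
--
--                 l3[1] = d[1]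
--                 l3[2] = d[2]
--                 l4.append(l3)
--         return l4
-- ===== SOURCE B (Python) =====
-- def fmt_data(data):
--     if not data:
--         return []
--     width = len(data[0])
--
--     # 1) split data into consecutive runs sharing the run's FIRST d[0]
--     groups = []
--     cur = []
--     for d in data:
--         if cur and cur[0][0] == d[0]:
--             cur.append(d)
--         else:
--             if cur:
--                 groups.append(cur)
--             cur = [d]
--     groups.append(cur)
--
--     # 2) render each run as a header row followed by its data rows
--     def render(g):
--         header = [''] * width
--         header[0] = g[0][0]
--         rows = [header]
--         for d in g:
--             row = [''] * width
--             row[1] = d[1]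
--             row[2] = d[2]
--             rows.append(row)
--         return rows
--
--     return [row for g in groups for row in render(g)]
-- ===== Notes on version B (the rewrite author's own statement) =====
-- stated objective: alternative
-- what changed: Replaces A's single pass that mutates a negative back-pointer into the output list with a two-level decomposition: first split the data into consecutive runs keyed on the run's first d[0], then render each run as a header row plus its data rows; same cost, but the grouping logic is separated from the row formatting.
import Mathlib
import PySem

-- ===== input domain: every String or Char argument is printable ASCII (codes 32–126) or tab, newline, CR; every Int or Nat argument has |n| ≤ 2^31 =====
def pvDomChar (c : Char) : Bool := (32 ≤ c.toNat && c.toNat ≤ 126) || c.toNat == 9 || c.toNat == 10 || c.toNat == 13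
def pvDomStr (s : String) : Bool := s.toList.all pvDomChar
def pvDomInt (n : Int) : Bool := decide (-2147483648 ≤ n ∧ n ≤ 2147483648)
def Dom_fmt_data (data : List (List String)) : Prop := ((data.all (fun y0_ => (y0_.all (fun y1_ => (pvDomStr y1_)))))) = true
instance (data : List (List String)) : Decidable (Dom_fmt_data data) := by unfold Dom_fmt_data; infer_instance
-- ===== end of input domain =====

-- B restructures A (split into consecutive runs keyed on each run's first d[0], then render each run) instead of A's back-pointer single pass; return values agree on Pre_.

-- ===== PORT A =====
-- loop body of A; indexing/assignment via PySem.List.pyGetD / pySetD (exact where Python does not raise, which Pre_ guarantees)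
def fmtDataStep (w : Nat) (st : List (List String) × Int) (d : List String) : List (List String) × Int :=
  let l2 : List String := List.replicate w ""
  let l3 : List String := List.replicate w ""
  let st' :=
    if st.1.length ≠ 0 then
      if PySem.List.pyGetD (PySem.List.pyGetD st.1 st.2 []) 0 "" ≠ PySem.List.pyGetD d 0 "" then
        (st.1 ++ [PySem.List.pySetD l2 0 (PySem.List.pyGetD d 0 "")], (-2 : Int))
      else
        (st.1, st.2 - 1)
    else
      (st.1 ++ [PySem.List.pySetD l2 0 (PySem.List.pyGetD d 0 "")], st.2)
  let l3 := PySem.List.pySetD (PySem.List.pySetD l3 1 (PySem.List.pyGetD d 1 "")) 2 (PySem.List.pyGetD d 2 "")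
  (st'.1 ++ [l3], st'.2)

def fmt_data (data : List (List String)) : List (List String) :=
  (data.foldl (fmtDataStep (PySem.List.pyGetD data 0 []).length) ([], -2)).1

-- ===== PORT B =====
-- run-splitting step: extend the current run if d[0] equals the run's first d[0], else close it
def fmtAltStep (st : List (List (List String)) × List (List String)) (d : List String) :
    List (List (List String)) × List (List String) :=
  if st.2 ≠ [] ∧ PySem.List.pyGetD (PySem.List.pyGetD st.2 0 []) 0 "" = PySem.List.pyGetD d 0 "" then
    (st.1, st.2 ++ [d])
  else
    ((if st.2 ≠ [] then st.1 ++ [st.2] else st.1), [d])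

def fmtHeader (w : Nat) (g : List (List String)) : List String :=
  PySem.List.pySetD (List.replicate w "") 0 (PySem.List.pyGetD (PySem.List.pyGetD g 0 []) 0 "")

def fmtRow (w : Nat) (d : List String) : List String :=
  PySem.List.pySetD (PySem.List.pySetD (List.replicate w "") 1 (PySem.List.pyGetD d 1 "")) 2
    (PySem.List.pyGetD d 2 "")

def fmtRender (w : Nat) (g : List (List String)) : List (List String) :=
  fmtHeader w g :: g.map (fmtRow w)

def fmt_data_alt (data : List (List String)) : List (List String) :=
  match data with
  | [] => []
  | d0 :: _ =>
    let w := d0.length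
    let st := data.foldl fmtAltStep ([], [])
    (st.1 ++ [st.2]).flatMap (fmtRender w)

-- ===== PRECONDITION & SPEC =====
-- Pre_ excludes exactly the inputs where Python A raises IndexError: a row with fewer than 3 entries
-- (d[1]/d[2] or the width-len(data[0]) assignments l2[0]/l3[1]/l3[2] go out of range).
def Pre_fmt_data (data : List (List String)) : Prop := ∀ d ∈ data, 3 ≤ d.length
instance (data : List (List String)) : Decidable (Pre_fmt_data data) := by unfold Pre_fmt_data; infer_instance
def pvWitness_fmt_data : List (List String) := [["a", "x", "y"], ["a", "u", "v"], ["b", "p", "q"]]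
def Spec_fmt_data (data : List (List String)) (out : List (List String)) : Prop := out = fmt_data_alt data
instance (data : List (List String)) (out : List (List String)) : Decidable (Spec_fmt_data data out) := by unfold Spec_fmt_data; infer_instance

-- ===== CLAIM (what is proved, stated in full; the proofs are below) =====
def Claim_equal_fmt_data : Prop := ∀ (data : List (List String)), Dom_fmt_data data → Pre_fmt_data data → Spec_fmt_data data (fmt_data data)

-- ===== LEMMAS AND PROOFS =====

-- header readback: slot 0 of a run's header is the run's first d[0] (needs width ≥ 1)
theorem fmt_header_get (w : Nat) (hw : 0 < w) (g : List (List String)) :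
    PySem.List.pyGetD (fmtHeader w g) 0 "" = PySem.List.pyGetD (PySem.List.pyGetD g 0 []) 0 "" := by
  obtain ⟨w', rfl⟩ : ∃ w', w = w' + 1 := ⟨w - 1, by omega⟩
  have h1 : PySem.List.pySetD (List.replicate (w' + 1) "") 0
      (PySem.List.pyGetD (PySem.List.pyGetD g 0 []) 0 "")
      = PySem.List.pyGetD (PySem.List.pyGetD g 0 []) 0 "" :: List.replicate w' "" := by
    rw [PySem.List.pySetD_of_nonneg _ _ (by norm_num)]
    simp [List.replicate_succ]
  rw [fmtHeader, h1, PySem.List.pyGetD_zero_cons]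

-- a run's header only depends on its first row
theorem fmt_header_append (w : Nat) (g : List (List String)) (hg : g ≠ []) (d : List String) :
    fmtHeader w (g ++ [d]) = fmtHeader w g := by
  cases g with
  | nil => exact absurd rfl hg
  | cons c cs => simp [fmtHeader]

-- negative back-pointer: element -(1+|t|) of X ++ h :: t is h
theorem fmt_getD_back {α : Type} (X : List α) (h : α) (t : List α) (d : α) :
    PySem.List.pyGetD (X ++ h :: t) (-(1 + (t.length : Int))) d = h := by
  have hcast : (-(1 + (t.length : Int))) = -(((t.length + 1 : Nat)) : Int) := by push_cast; ring
  rw [hcast, PySem.List.pyGetD_neg_natCast _ _ _ (by omega) (by simp)]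
  have hidx : (X ++ h :: t).length - (t.length + 1) = X.length := by simp
  simp [hidx, List.getElem_append_right (Nat.le_refl X.length)]

-- main invariant: from any state "groups closed, cur open (nonempty)", A's back-pointer fold
-- and B's run-splitting fold stay in lockstep
theorem fmt_inv (w : Nat) (hw : 0 < w) (rest : List (List String))
    (groups : List (List (List String))) (cur : List (List String)) (hc : cur ≠ []) :
    rest.foldl (fmtDataStep w) ((groups ++ [cur]).flatMap (fmtRender w), -(1 + (cur.length : Int)))
      = (((rest.foldl fmtAltStep (groups, cur)).1 ++ [(rest.foldl fmtAltStep (groups, cur)).2]).flatMap (fmtRender w),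
         -(1 + (((rest.foldl fmtAltStep (groups, cur)).2).length : Int))) := by
  induction rest generalizing groups cur with
  | nil => simp
  | cons d rest ih =>
    have hL : (groups ++ [cur]).flatMap (fmtRender w)
        = groups.flatMap (fmtRender w) ++ (fmtHeader w cur :: cur.map (fmtRow w)) := by
      simp [fmtRender]
    have hback : PySem.List.pyGetD ((groups ++ [cur]).flatMap (fmtRender w)) (-(1 + (cur.length : Int))) []
        = fmtHeader w cur := by
      rw [hL]
      have := fmt_getD_back (groups.flatMap (fmtRender w)) (fmtHeader w cur) (cur.map (fmtRow w)) ([] : List String)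
      simpa using this
    have hne : ((groups ++ [cur]).flatMap (fmtRender w)).length ≠ 0 := by
      rw [hL]; simp
    rw [List.foldl_cons, List.foldl_cons]
    by_cases hkey : PySem.List.pyGetD (PySem.List.pyGetD cur 0 []) 0 "" = PySem.List.pyGetD d 0 ""
    · have hstepA : fmtDataStep w ((groups ++ [cur]).flatMap (fmtRender w), -(1 + (cur.length : Int))) d
          = ((groups ++ [(cur ++ [d])]).flatMap (fmtRender w), -(1 + ((cur ++ [d]).length : Int))) := by
        simp only [fmtDataStep, hback, fmt_header_get w hw cur, hkey, hne, ne_eq,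
          not_true_eq_false, not_false_eq_true, if_true, if_false, ite_true, ite_false,
          Prod.mk.injEq]
        constructor
        · rw [hL]
          simp [fmtRender, fmt_header_append w cur hc d, fmtRow]
        · simp only [List.length_append, List.length_cons, List.length_nil]; push_cast; ring
      have hstepB : fmtAltStep (groups, cur) d = (groups, cur ++ [d]) := by
        simp [fmtAltStep, hc, hkey]
      rw [hstepA, hstepB]
      exact ih groups (cur ++ [d]) (by simp)
    · have hstepA : fmtDataStep w ((groups ++ [cur]).flatMap (fmtRender w), -(1 + (cur.length : Int))) d
          = (((groups ++ [cur]) ++ [[d]]).flatMap (fmtRender w), -(1 + (([d] : List (List String)).length : Int))) := by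
        simp only [fmtDataStep, hback, fmt_header_get w hw cur, hne, hkey, ne_eq,
          not_false_eq_true, if_true, Prod.mk.injEq]
        constructor
        · simp [fmtRender, fmtHeader, fmtRow]
        · norm_num
      have hstepB : fmtAltStep (groups, cur) d = (groups ++ [cur], [d]) := by
        simp [fmtAltStep, hc, hkey]
      rw [hstepA, hstepB]
      exact ih (groups ++ [cur]) [d] (by simp)

-- ===== VERDICT (by name: the statement is the Claim_ definition above) =====
theorem fmt_data_spec : Claim_equal_fmt_data := by
  intro data hdom hpre
  unfold Spec_fmt_data
  cases data with
  | nil => rfl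
  | cons d0 rest =>
    have hw : 0 < d0.length := by
      have := hpre d0 (by simp)
      omega
    unfold fmt_data fmt_data_alt
    have hw0 : (PySem.List.pyGetD (d0 :: rest) 0 []).length = d0.length := by
      rw [PySem.List.pyGetD_zero_cons]
    rw [hw0]
    rw [List.foldl_cons, List.foldl_cons]
    have hA0 : fmtDataStep d0.length (([], -2)) d0
        = (((([] : List (List (List String))) ++ [[d0]]).flatMap (fmtRender d0.length)),
           -(1 + ((([d0] : List (List String))).length : Int))) := by
      simp [fmtDataStep, fmtRender, fmtHeader, fmtRow]
    have hB0 : fmtAltStep (([], []) : List (List (List String)) × List (List String)) d0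
        = ([], [d0]) := by
      simp [fmtAltStep]
    rw [hA0, hB0, fmt_inv d0.length hw rest [] [d0] (by simp)]
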